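-- pv_equiv track=rewrite | github.com/mv805/chess_variant | ChessVar.py | _is_valid_coordinate
-- ===== SOURCE A (Python) =====
-- def _is_valid_coordinate(coord: str) -> bool:
--     """Determines if a given input is a valid coordinate on the chess board.
--
--     Args:
--         coord (str): the given user coordinate inpue. i.e. "a1"
--
--     Returns:
--         bool: True if it is valid board selection. False if otherwise
--     """
--     valid_columns = {"a", "b", "c", "d", "e", "f", "g", "h"}
--     valid_rows = {"1", "2", "3", "4", "5", "6", "7", "8"}
--
--     if len(coord) > 2 or len(coord) < 2:
--         return False
--     elif coord is None:
--         return False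
--
--     col, row = [character for character in coord]
--
--     if col not in valid_columns or row not in valid_rows:
--         return False
--     else:
--         return True
-- ===== SOURCE B (Python) =====
-- import re
--
-- _COORD_RE = re.compile(r'[a-h][1-8]')
--
-- def _is_valid_coordinate(coord: str) -> bool:
--     """True iff coord is a two-character board coordinate like 'a1'."""
--     return bool(_COORD_RE.fullmatch(coord))
-- ===== Notes on version B (the rewrite author's own statement) =====
-- stated objective: idiomatic
-- what changed: Replaces the length check, list unpacking and two set-membership tests with a single precompiled regex fullmatch of the fixed pattern [a-h][1-8].
import Mathlib
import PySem

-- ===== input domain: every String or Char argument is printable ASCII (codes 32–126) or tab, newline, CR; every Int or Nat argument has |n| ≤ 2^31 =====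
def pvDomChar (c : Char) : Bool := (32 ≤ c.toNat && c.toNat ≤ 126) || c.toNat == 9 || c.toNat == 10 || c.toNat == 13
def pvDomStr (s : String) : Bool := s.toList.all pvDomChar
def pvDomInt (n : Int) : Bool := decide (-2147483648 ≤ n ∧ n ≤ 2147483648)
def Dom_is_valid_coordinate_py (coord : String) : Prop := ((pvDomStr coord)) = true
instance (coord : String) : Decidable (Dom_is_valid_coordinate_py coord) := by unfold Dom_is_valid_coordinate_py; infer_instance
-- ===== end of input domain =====

-- B replaces A's length check + unpack + two set-membership tests with one regex-style
-- two-character pattern match ([a-h][1-8]); idiomatic, same cost.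
-- ===== PORT A =====
def is_valid_coordinate_py (coord : String) : Bool :=
  -- valid_columns / valid_rows: Python sets of one-character strings; elements modelled as Char
  let valid_columns : PySem.Set Char := PySem.Set.ofList ['a','b','c','d','e','f','g','h']
  let valid_rows : PySem.Set Char := PySem.Set.ofList ['1','2','3','4','5','6','7','8']
  let cs := coord.toList
  if cs.length > 2 || cs.length < 2 then false
  else
    -- 'coord is None' branch: unreachable for a String argument, returns False anyway
    match cs with
    | [col, row] => if !(valid_columns.contains col) || !(valid_rows.contains row) then false else true
    | _ => false  -- unreachable: length is exactly 2 here

-- ===== PORT B =====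
-- re.fullmatch(r'[a-h][1-8]', coord): the whole string must be exactly one char in [a-h]
-- followed by one char in [1-8]; ported as a direct two-character pattern match.
def is_valid_coordinate_py_alt (coord : String) : Bool :=
  match coord.toList with
  | [] => false
  | [_] => false
  | [c, r] => ('a' ≤ c && c ≤ 'h') && ('1' ≤ r && r ≤ '8')
  | _ :: _ :: _ :: _ => false

-- ===== PRECONDITION & SPEC =====
def Spec_is_valid_coordinate_py (coord : String) (out : Bool) : Prop := out = is_valid_coordinate_py_alt coord
instance (coord : String) (out : Bool) : Decidable (Spec_is_valid_coordinate_py coord out) := by unfold Spec_is_valid_coordinate_py; infer_instance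

-- ===== CLAIM (what is proved, stated in full; the proofs are below) =====
def Claim_equal_is_valid_coordinate_py : Prop := ∀ (coord : String), Dom_is_valid_coordinate_py coord → Spec_is_valid_coordinate_py coord (is_valid_coordinate_py coord)

-- ===== LEMMAS AND PROOFS =====
theorem mem_cols_iff_range (c : Char) :
    (['a','b','c','d','e','f','g','h'].contains c) = ('a' ≤ c && c ≤ 'h') := by
  simp only [List.contains, List.elem_eq_mem, List.mem_cons, List.not_mem_nil, or_false]
  rw [Bool.eq_iff_iff]
  simp [Char.le_def, Char.ext_iff, UInt32.ext_iff, UInt32.le_iff_toBitVec_le, BitVec.le_def]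
  omega

theorem mem_rows_iff_range (r : Char) :
    (['1','2','3','4','5','6','7','8'].contains r) = ('1' ≤ r && r ≤ '8') := by
  simp only [List.contains, List.elem_eq_mem, List.mem_cons, List.not_mem_nil, or_false]
  rw [Bool.eq_iff_iff]
  simp [Char.le_def, Char.ext_iff, UInt32.ext_iff, UInt32.le_iff_toBitVec_le, BitVec.le_def]
  omega

-- ===== VERDICT (by name: the statement is the Claim_ definition above) =====
theorem is_valid_coordinate_py_spec : Claim_equal_is_valid_coordinate_py := by
  intro coord _
  unfold Spec_is_valid_coordinate_py is_valid_coordinate_py is_valid_coordinate_py_alt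
  simp only [PySem.Set.ofList]
  rcases h : coord.toList with _ | ⟨c, _ | ⟨r, _ | ⟨d, t⟩⟩⟩
  · simp
  · simp
  · simp only [List.length_cons, List.length_nil]
    simp only [show List.foldl PySem.Set.add PySem.Set.empty ['a','b','c','d','e','f','g','h'] = ['a','b','c','d','e','f','g','h'] from by decide,
        show List.foldl PySem.Set.add PySem.Set.empty ['1','2','3','4','5','6','7','8'] = ['1','2','3','4','5','6','7','8'] from by decide,
        PySem.Set.contains_eq_listContains, mem_cols_iff_range, mem_rows_iff_range]
    cases h1 : ('a' ≤ c && c ≤ 'h') <;> cases h2 : ('1' ≤ r && r ≤ '8') <;> simp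
  · simp
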